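-- pv_equiv track=rewrite | github.com/kpusmo/net-calculator | format_binary_number.py | format_binary_number
-- ===== SOURCE A (Python) =====
-- def format_binary_number(binary_number):
--     if isinstance(binary_number, int):
--         binary_number = str(binary_number)
--     result = ''
--     while len(binary_number) % 4 != 0:
--         binary_number = '0' + binary_number
--     binary_number_string_length = len(binary_number)
--     for i in range(binary_number_string_length):
--         if ((binary_number_string_length - i) % 4) == 0 and i != 0:
--             result += ' '
--         result += binary_number[i]
--     return result
-- ===== SOURCE B (Python) =====
-- def format_binary_number(binary_number):
--     if isinstance(binary_number, int):
--         binary_number = str(binary_number)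
--     width = ((len(binary_number) + 3) // 4) * 4
--     padded = binary_number.rjust(width, '0')
--     return ' '.join(padded[i:i + 4] for i in range(0, width, 4))
-- ===== Notes on version B (the rewrite author's own statement) =====
-- stated objective: simpler
-- what changed: B pads to a multiple of 4 in one rjust with the width computed in closed form and joins 4-character slices with ' '.join, instead of A's one-char-at-a-time padding loop and per-character loop testing (len-i)%4 to decide where a space goes.
import Mathlib
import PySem

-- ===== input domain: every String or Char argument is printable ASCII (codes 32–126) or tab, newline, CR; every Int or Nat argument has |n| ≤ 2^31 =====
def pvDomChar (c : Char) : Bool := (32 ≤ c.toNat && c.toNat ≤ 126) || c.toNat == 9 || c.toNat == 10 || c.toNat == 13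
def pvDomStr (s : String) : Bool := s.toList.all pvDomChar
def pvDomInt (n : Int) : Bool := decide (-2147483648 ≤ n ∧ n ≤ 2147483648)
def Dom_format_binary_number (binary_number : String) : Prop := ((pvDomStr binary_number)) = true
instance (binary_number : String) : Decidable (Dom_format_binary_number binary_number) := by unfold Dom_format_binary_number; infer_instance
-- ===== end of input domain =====

-- B replaces A's char-at-a-time padding loop and per-character space test with a
-- closed-form pad width + 4-character chunk slicing joined by spaces (objective: simpler).
-- The parameter is a String, so A's isinstance(int) branch is vacuous and not ported.

-- ===== PORT A =====
-- while len(binary_number) % 4 != 0: binary_number = '0' + binary_number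
-- (the loop runs exactly (4 - len % 4) % 4 times; that count is the structural fuel)
def pvPadAux : Nat → List Char → List Char
  | 0, l => l
  | f + 1, l => if l.length % 4 ≠ 0 then pvPadAux f ('0' :: l) else l

def pvPadA (l : List Char) : List Char :=
  pvPadAux ((4 - l.length % 4) % 4) l

-- for i in range(n): if (n - i) % 4 == 0 and i != 0: result += ' ' ; result += binary_number[i]
-- (each iteration sees the index i and the character binary_number[i]: folded over enumerate)
def format_binary_number (binary_number : String) : String :=
  let padded := pvPadA binary_number.toList
  let n : Int := padded.length
  let result := (PySem.List.enumerate padded 0).foldl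
    (fun (acc : List Char) (ic : Int × Char) =>
      let acc' := if PySem.Int.mod (n - ic.1) 4 = 0 ∧ ic.1 ≠ 0 then acc ++ [' '] else acc
      acc' ++ [ic.2]) []
  String.mk result

-- ===== PORT B =====
-- the 4-character slices padded[i:i+4] for i in range(0, width, 4)
-- (range(0, width, 4) has a definite trip count; the list length is the structural fuel)
def pvChunks4Aux : Nat → List Char → List (List Char)
  | 0, _ => []
  | f + 1, l => if l = [] then [] else l.take 4 :: pvChunks4Aux f (l.drop 4)

def pvChunks4 (l : List Char) : List (List Char) :=
  pvChunks4Aux l.length l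

-- ' '.join
def pvJoinSp : List (List Char) → List Char
  | [] => []
  | [x] => x
  | x :: y :: xs => x ++ ' ' :: pvJoinSp (y :: xs)

def format_binary_number_alt (binary_number : String) : String :=
  let n := binary_number.toList.length
  let width := ((n + 3) / 4) * 4
  let padded := List.replicate (width - n) '0' ++ binary_number.toList
  String.mk (pvJoinSp (pvChunks4 padded))

-- ===== PRECONDITION & SPEC =====
def Spec_format_binary_number (binary_number : String) (out : String) : Prop := out = format_binary_number_alt binary_number
instance (binary_number : String) (out : String) : Decidable (Spec_format_binary_number binary_number out) := by unfold Spec_format_binary_number; infer_instance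

-- ===== CLAIM (what is proved, stated in full; the proofs are below) =====
def Claim_equal_format_binary_number : Prop := ∀ (binary_number : String), Dom_format_binary_number binary_number → Spec_format_binary_number binary_number (format_binary_number binary_number)

-- ===== LEMMAS AND PROOFS =====

-- the per-item contribution of A's loop body
def pvH (n : Int) (ic : Int × Char) : List Char :=
  (if PySem.Int.mod (n - ic.1) 4 = 0 ∧ ic.1 ≠ 0 then [' '] else []) ++ [ic.2]

theorem pvPadAux_eq : ∀ (f : Nat) (l : List Char), (4 - l.length % 4) % 4 = f →
    pvPadAux f l = List.replicate f '0' ++ l := by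
  intro f
  induction f with
  | zero => intro l _; simp [pvPadAux]
  | succ f ih =>
      intro l h
      have hne : l.length % 4 ≠ 0 := by omega
      rw [pvPadAux, if_pos hne, ih ('0' :: l) (by simp only [List.length_cons]; omega),
          List.replicate_succ', List.append_assoc]
      rfl

theorem pvPadA_eq (l : List Char) :
    pvPadA l = List.replicate ((4 - l.length % 4) % 4) '0' ++ l :=
  pvPadAux_eq _ l rfl

theorem pvChunks4Aux_nil (f : Nat) : pvChunks4Aux f [] = [] := by
  cases f with
  | zero => rfl
  | succ f => simp [pvChunks4Aux]

theorem pvChunks4Aux_fuel : ∀ (f g : Nat) (l : List Char),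
    l.length ≤ f → l.length ≤ g → pvChunks4Aux f l = pvChunks4Aux g l := by
  intro f
  induction f with
  | zero =>
      intro g l hf _
      have : l = [] := by cases l with | nil => rfl | cons c t => simp at hf
      subst this
      rw [pvChunks4Aux_nil, pvChunks4Aux_nil]
  | succ f ih =>
      intro g l hf hg
      cases l with
      | nil => rw [pvChunks4Aux_nil, pvChunks4Aux_nil]
      | cons c t =>
          cases g with
          | zero => simp at hg
          | succ g =>
              rw [pvChunks4Aux, pvChunks4Aux, if_neg (by simp), if_neg (by simp)]
              have hd : ((c :: t).drop 4).length ≤ f := by simp at hf ⊢; omega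
              have hd' : ((c :: t).drop 4).length ≤ g := by simp at hg ⊢; omega
              rw [ih g _ hd hd']

theorem pvChunks4_cons (c : Char) (t : List Char) :
    pvChunks4 (c :: t) = (c :: t).take 4 :: pvChunks4 ((c :: t).drop 4) := by
  show pvChunks4Aux (c :: t).length (c :: t) = _
  rw [show (c :: t).length = t.length + 1 from by simp, pvChunks4Aux, if_neg (by simp)]
  congr 1
  exact pvChunks4Aux_fuel t.length _ _ (by simp) le_rfl

theorem pvFoldl_eq_flatMap (n : Int) (xs : List (Int × Char)) (acc : List Char) :
    xs.foldl (fun (acc : List Char) (ic : Int × Char) =>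
      let acc' := if PySem.Int.mod (n - ic.1) 4 = 0 ∧ ic.1 ≠ 0 then acc ++ [' '] else acc
      acc' ++ [ic.2]) acc = acc ++ xs.flatMap (pvH n) := by
  have hf : (fun (acc : List Char) (ic : Int × Char) =>
      let acc' := if PySem.Int.mod (n - ic.1) 4 = 0 ∧ ic.1 ≠ 0 then acc ++ [' '] else acc
      acc' ++ [ic.2]) = fun (acc : List Char) (ic : Int × Char) => acc ++ pvH n ic := by
    funext a ic
    simp only [pvH]
    split <;> simp
  rw [hf, PySem.List.foldl_append_eq_flatMap]

-- index shift: for indices ≥ 1, dropping 4 leading characters shifts both n and i by 4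
theorem pvShift (m : Int) (b : List Char) : ∀ (k : Int), 1 ≤ k →
    (PySem.List.enumerate b (k + 4)).flatMap (pvH (m + 4)) =
      (PySem.List.enumerate b k).flatMap (pvH m) := by
  induction b with
  | nil => intro k _; simp [PySem.List.enumerate_nil]
  | cons c b ih =>
      intro k hk
      rw [PySem.List.enumerate_cons, PySem.List.enumerate_cons]
      simp only [List.flatMap_cons]
      have h1 : k + 4 + 1 = (k + 1) + 4 := by ring
      rw [h1, ih (k + 1) (by omega)]
      have h2 : pvH (m + 4) (k + 4, c) = pvH m (k, c) := by
        simp [pvH, show m + 4 - (k + 4) = m - k from by ring,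
              show (k + 4 : Int) ≠ 0 from by omega, show (k : Int) ≠ 0 from by omega]
      rw [h2]

theorem pvChunks4_ne_nil (l : List Char) (h : l ≠ []) : pvChunks4 l ≠ [] := by
  cases l with
  | nil => exact absurd rfl h
  | cons c t => rw [pvChunks4_cons]; simp

theorem pvMod_pos (a : Int) (h : 0 ≤ a) : PySem.Int.mod a 4 = a % 4 :=
  PySem.Int.mod_eq_emod_of_pos (by omega)

-- main lemma: on a list whose length is a multiple of 4, A's loop output is the
-- space-joined list of 4-chunks
theorem pvMain (l : List Char) (h : l.length % 4 = 0) :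
    (PySem.List.enumerate l 0).flatMap (pvH (l.length : Int)) = pvJoinSp (pvChunks4 l) := by
  induction hn : l.length using Nat.strong_induction_on generalizing l with
  | _ N ih =>
  subst hn
  match l, h with
  | [], _ => simp [PySem.List.enumerate_nil, pvChunks4, pvChunks4Aux, pvJoinSp]
  | [c], h | [c,c'], h | [c,c',c''], h => simp at h
  | c0 :: c1 :: c2 :: c3 :: b, h =>
    have hb : b.length % 4 = 0 := by simp at h; omega
    have hlen : (c0 :: c1 :: c2 :: c3 :: b).length = b.length + 4 := by simp
    have hn4 : ((c0 :: c1 :: c2 :: c3 :: b).length : Int) = (b.length : Int) + 4 := by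
      rw [hlen]; push_cast; ring
    set m : Int := (b.length : Int) with hm
    rw [hn4]
    have hmmod : m % 4 = 0 := by omega
    rw [PySem.List.enumerate_cons, PySem.List.enumerate_cons,
        PySem.List.enumerate_cons, PySem.List.enumerate_cons]
    norm_num only
    simp only [List.flatMap_cons]
    have e0 : pvH (m + 4) (0, c0) = [c0] := by simp [pvH]
    have e1 : pvH (m + 4) (1, c1) = [c1] := by
      simp only [pvH]
      rw [if_neg]
      · simp
      · rintro ⟨h1, -⟩
        rw [pvMod_pos _ (by omega)] at h1
        omega
    have e2 : pvH (m + 4) (2, c2) = [c2] := by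
      simp only [pvH]
      rw [if_neg]
      · simp
      · rintro ⟨h1, -⟩
        rw [pvMod_pos _ (by omega)] at h1
        omega
    have e3 : pvH (m + 4) (3, c3) = [c3] := by
      simp only [pvH]
      rw [if_neg]
      · simp
      · rintro ⟨h1, -⟩
        rw [pvMod_pos _ (by omega)] at h1
        omega
    rw [e0, e1, e2, e3]
    have hch : pvChunks4 (c0 :: c1 :: c2 :: c3 :: b) = [c0,c1,c2,c3] :: pvChunks4 b := by
      rw [pvChunks4_cons]; simp
    rw [hch]
    match b, hb, hmmod with
    | [], _, _ =>
        simp [PySem.List.enumerate_nil, pvChunks4, pvChunks4Aux, pvJoinSp]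
    | c :: b', hb, hmmod =>
        have hIH : (PySem.List.enumerate (c :: b') 0).flatMap (pvH ((c :: b').length : Int)) =
            pvJoinSp (pvChunks4 (c :: b')) :=
          ih (c :: b').length (by rw [hlen]; omega) (c :: b') hb rfl
        rw [← hm] at hIH
        have h4 : pvH (m + 4) (4, c) = [' ', c] := by
          simp only [pvH]
          rw [if_pos]
          · simp
          · exact ⟨by rw [pvMod_pos _ (by omega)]; omega, by norm_num⟩
        rw [PySem.List.enumerate_cons]
        simp only [List.flatMap_cons]
        rw [h4]
        have hsh : (PySem.List.enumerate b' (4 + 1)).flatMap (pvH (m + 4)) =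
            (PySem.List.enumerate b' 1).flatMap (pvH m) := by
          have := pvShift m b' 1 (by omega)
          simpa using this
        rw [hsh]
        obtain ⟨d, ds, hds⟩ : ∃ d ds, pvChunks4 (c :: b') = d :: ds := by
          cases hcc : pvChunks4 (c :: b') with
          | nil => exact absurd hcc (pvChunks4_ne_nil _ (by simp))
          | cons d ds => exact ⟨d, ds, rfl⟩
        rw [PySem.List.enumerate_cons] at hIH
        simp only [List.flatMap_cons] at hIH
        have hc0 : pvH m (0, c) = [c] := by simp [pvH]
        rw [hc0, hds] at hIH
        norm_num only at hIH ⊢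
        rw [hds]
        simp only [pvJoinSp]
        rw [← hIH]
        simp

-- ===== VERDICT (by name: the statement is the Claim_ definition above) =====
theorem format_binary_number_spec : Claim_equal_format_binary_number := by
  intro s _
  unfold Spec_format_binary_number format_binary_number format_binary_number_alt
  simp only
  rw [pvFoldl_eq_flatMap]
  set l := s.toList with hl
  have hpad : pvPadA l = List.replicate ((((l.length + 3) / 4) * 4) - l.length) '0' ++ l := by
    rw [pvPadA_eq]
    congr 1
    congr 1
    omega
  have hlenpad : (pvPadA l).length % 4 = 0 := by
    rw [hpad]; simp; omega
  have := pvMain (pvPadA l) hlenpad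
  rw [List.nil_append, this, hpad]
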